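-- pv_equiv track=rewrite | github.com/voonkvuno/Algorithm | 프로그래머스/unrated/135808. 과일 장수/과일 장수.py | solution
-- ===== SOURCE A (Python) =====
-- def solution(k, m, score):
--     cnt, box, answer = [0,0,0,0,0,0,0,0,0,0], 0, 0
--
--     for i in score:
--         cnt[i] += 1
--
--     for i, v in reversed(list(enumerate(cnt))):
--         box += v
--         if box//m > 0:
--             answer += i * m * (box//m)
--             box = box%m
--
--     return answer
-- ===== SOURCE B (Python) =====
-- def solution(k, m, score):
--     s = sorted(score, reverse=True)
--     boxes = len(score) // m
--     answer = 0
--     for b in range(boxes):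
--         answer += s[b * m + m - 1] * m
--     return answer
-- ===== Notes on version B (the rewrite author's own statement) =====
-- stated objective: alternative
-- what changed: Replaces the 10-bucket counting tally and top-down bucket sweep (box-residue accounting) with an explicit descending sort plus a stride-m loop that adds each complete m-group's minimum element times m.
-- intended difference: On inputs containing a negative score with 1 <= m <= len(score), A's cnt[x] for x < 0 silently wraps around and tallies the grade x + 10 (A returns 9 on m=1, score=[-1]); B prices boxes from the actual sorted values (returning -1 there), the intended total since a negative score is a low grade, not a high one. — e.g. on solution(0, 1, [-1]): A returns 9, B returns -1
import Mathlib
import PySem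

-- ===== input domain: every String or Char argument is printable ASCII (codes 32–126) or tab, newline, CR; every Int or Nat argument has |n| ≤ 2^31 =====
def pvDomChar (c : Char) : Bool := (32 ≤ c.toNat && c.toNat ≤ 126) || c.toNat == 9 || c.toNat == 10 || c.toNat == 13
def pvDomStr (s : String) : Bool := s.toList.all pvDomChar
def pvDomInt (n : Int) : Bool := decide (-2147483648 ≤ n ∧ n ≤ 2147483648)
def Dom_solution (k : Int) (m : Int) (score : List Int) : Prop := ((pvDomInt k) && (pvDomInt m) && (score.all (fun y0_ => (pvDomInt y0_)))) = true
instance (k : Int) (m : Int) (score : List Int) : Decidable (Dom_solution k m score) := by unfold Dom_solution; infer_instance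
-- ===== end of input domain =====

-- B replaces A's 10-bucket counting tally + top-down bucket sweep by an explicit descending
-- sort plus a stride-m loop over the complete m-groups (alternative decomposition, not faster);
-- on scores < 0 (D_) B sorts the true values where A's negative list index silently wraps.


-- ===== PORT A =====
-- cnt[i] += 1 (Python list-index semantics, including negative-index wraparound)
def cntStep (c : List Int) (i : Int) : List Int :=
  PySem.List.pySetD c i (PySem.List.pyGetD c i 0 + 1)

-- body of 'for i, v in reversed(list(enumerate(cnt)))' over the state (box, answer)
def sweepStep (m : Int) (st : Int × Int) (iv : Int × Int) : Int × Int :=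
  let box := st.1 + iv.2
  if 0 < PySem.Int.floordiv box m then
    (PySem.Int.mod box m, st.2 + iv.1 * m * PySem.Int.floordiv box m)
  else (box, st.2)

def solution (k : Int) (m : Int) (score : List Int) : Int :=
  let cnt : List Int := score.foldl cntStep [0,0,0,0,0,0,0,0,0,0]
  (((PySem.List.enumerate cnt 0).reverse).foldl (sweepStep m) (0, 0)).2

-- ===== PORT B =====
def solution_alt (k : Int) (m : Int) (score : List Int) : Int :=
  let s := PySem.List.sorted score (fun x => x) true
  let boxes := PySem.Int.floordiv (score.length : Int) m
  (PySem.List.pyRange 0 boxes 1).foldl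
    (fun answer b => answer + PySem.List.pyGetD s (b * m + m - 1) 0 * m) 0

-- ===== PRECONDITION & SPEC =====
-- Pre_ excludes exactly the inputs on which A raises: m = 0 (ZeroDivisionError) and any score
-- outside [-10, 9] (IndexError on cnt).
def Pre_solution (k : Int) (m : Int) (score : List Int) : Prop :=
  m ≠ 0 ∧ ∀ x ∈ score, -10 ≤ x ∧ x ≤ 9
instance (k : Int) (m : Int) (score : List Int) : Decidable (Pre_solution k m score) := by
  unfold Pre_solution; infer_instance

def pvWitness_solution : Int × Int × List Int := (3, 2, [1, 2, 3, 1])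

-- On inputs with some negative score and 1 ≤ m ≤ len(score), A's cnt[x] for x < 0 silently
-- wraps around and tallies the grade x + 10 (e.g. A returns 9 on m = 1, score = [-1]), while B
-- prices the boxes from the actual values (returning -1 there), which is the intended total
-- since a negative score is a low grade, not a high one.
def D_solution (k : Int) (m : Int) (score : List Int) : Prop :=
  (∃ x ∈ score, x < 0) ∧ 1 ≤ m ∧ m ≤ (score.length : Int)
instance (k : Int) (m : Int) (score : List Int) : Decidable (D_solution k m score) := by
  unfold D_solution; infer_instance

def Spec_solution (k : Int) (m : Int) (score : List Int) (out : Int) : Prop := ¬ D_solution k m score → out = solution_alt k m score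
instance (k : Int) (m : Int) (score : List Int) (out : Int) : Decidable (Spec_solution k m score out) := by unfold Spec_solution; infer_instance

def pvDiffWitness_solution : Int × Int × List Int := (0, 1, [-1])
def pvDiffWitnessOut_solution : Int × Int := (9, -1)

-- ===== CLAIM (what is proved, stated in full; the proofs are below) =====
def Claim_unchanged_solution : Prop := ∀ (k : Int) (m : Int) (score : List Int), Dom_solution k m score → Pre_solution k m score → Spec_solution k m score (solution k m score)
def Claim_changed_solution : Prop := Dom_solution (pvDiffWitness_solution.1) (pvDiffWitness_solution.2.1) (pvDiffWitness_solution.2.2) ∧ Pre_solution (pvDiffWitness_solution.1) (pvDiffWitness_solution.2.1) (pvDiffWitness_solution.2.2) ∧ D_solution (pvDiffWitness_solution.1) (pvDiffWitness_solution.2.1) (pvDiffWitness_solution.2.2) ∧ solution (pvDiffWitness_solution.1) (pvDiffWitness_solution.2.1) (pvDiffWitness_solution.2.2) = pvDiffWitnessOut_solution.1 ∧ solution_alt (pvDiffWitness_solution.1) (pvDiffWitness_solution.2.1) (pvDiffWitness_solution.2.2) = pvDiffWitnessOut_solution.2 ∧ pvDiffWitnessOut_solution.1 ≠ pvDiffW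itnessOut_solution.2

-- ===== LEMMAS AND PROOFS =====

-- the multiset that a (value, count) list denotes, in list order
def expand (ps : List (Int × Int)) : List Int :=
  ps.flatMap (fun p => List.replicate p.2.toNat p.1)

-- sum over the complete m-groups numbered a, a+1, …, b-1 of (last element of the group) * M
def gsumFrom (S : List Int) (M : Nat) (a b : Nat) : Int :=
  ((List.range (b - a)).map (fun t => S.getD ((a + t + 1) * M - 1) 0 * (M : Int))).sum

-- how many of the ten buckets tally the value j (bucket j counts j and the wrapped j - 10)
def cnt' (score : List Int) (j : Int) : Nat :=
  score.countP (fun x => decide (x = j ∨ x = j - 10))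

lemma gsumFrom_self (S : List Int) (M a : Nat) : gsumFrom S M a a = 0 := by simp [gsumFrom]

lemma gsumFrom_split (S : List Int) (M : Nat) (a b c : Nat) (hab : a ≤ b) (hbc : b ≤ c) :
    gsumFrom S M a c = gsumFrom S M a b + gsumFrom S M b c := by
  unfold gsumFrom
  have h : c - a = (b - a) + (c - b) := by omega
  rw [h, List.range_add, List.map_append, List.sum_append, List.map_map]
  congr 1
  refine congrArg List.sum (List.map_congr_left ?_)
  intro t ht
  simp only [Function.comp_apply]
  have h2 : a + (b - a + t) = b + t := by omega
  rw [h2]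

lemma div_shift (L V M : Nat) (hM : 0 < M) : (L + V) / M = L / M + (L % M + V) / M := by
  conv_lhs => rw [← Nat.div_add_mod L M, add_assoc, Nat.mul_add_div hM]

lemma mod_shift (L V M : Nat) : (L + V) % M = (L % M + V) % M := by
  conv_lhs => rw [← Nat.div_add_mod L M, add_assoc, Nat.mul_add_mod]

-- the core correspondence: A's residue-accumulator sweep over descending (value, count) pairs
-- adds, for every m-group it completes, that group's last element times m
lemma sweep_spec (M : Nat) (hM : 0 < M) :
    ∀ (ps : List (Int × Int)) (L : Nat) (ans : Int) (S : List Int),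
      (∀ p ∈ ps, 0 ≤ p.2) → S.drop L = expand ps → L ≤ S.length →
      ps.foldl (sweepStep (M : Int)) (((L % M : Nat) : Int), ans)
        = (((S.length % M : Nat) : Int), ans + gsumFrom S M (L / M) (S.length / M)) := by
  intro ps
  induction ps with
  | nil =>
    intro L ans S _ hdrop hL
    have : S.length ≤ L := List.drop_eq_nil_iff.mp (by simpa [expand] using hdrop)
    have hLS : L = S.length := le_antisymm hL this
    subst hLS
    simp [gsumFrom_self]
  | cons p tl ih =>
    intro L ans S hnn hdrop hL
    set V : Nat := p.2.toNat with hV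
    have hv : 0 ≤ p.2 := hnn p (by simp)
    have hpV : p.2 = (V : Int) := (Int.toNat_of_nonneg hv).symm
    have hdropexp : S.drop L = List.replicate V p.1 ++ expand tl := by
      simpa [expand] using hdrop
    have hlen : S.length - L = V + (expand tl).length := by
      have := congrArg List.length hdropexp
      simpa [List.length_drop] using this
    have hLV : L + V ≤ S.length := by omega
    have hdrop2 : S.drop (L + V) = expand tl := by
      have : S.drop (L + V) = (S.drop L).drop V := by
        rw [List.drop_drop]
      rw [this, hdropexp]
      simp
    obtain ⟨q, hq⟩ : ∃ q, q = (L % M + V) / M := ⟨_, rfl⟩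
    have hq_le : q * M ≤ L % M + V := by rw [hq]; exact Nat.div_mul_le_self _ M
    have hdiv : (L + V) / M = L / M + q := by rw [hq]; exact div_shift L V M hM
    have hmod : (L + V) % M = (L % M + V) % M := mod_shift L V M
    have hbox : ((L % M : Nat) : Int) + p.2 = ((L % M + V : Nat) : Int) := by
      rw [hpV]; push_cast; ring
    have hfd : PySem.Int.floordiv ((L % M + V : Nat) : Int) (M : Int) = (q : Int) := by
      rw [PySem.Int.floordiv_natCast, ← hq]
    have hmd : PySem.Int.mod ((L % M + V : Nat) : Int) (M : Int) = (((L % M + V) % M : Nat) : Int) := by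
      rw [PySem.Int.mod_natCast]
    rw [List.foldl_cons]
    by_cases hqpos : 0 < q
    · have hstep : sweepStep (M : Int) (((L % M : Nat) : Int), ans) p
          = ((((L + V) % M : Nat) : Int), ans + p.1 * (M : Int) * (q : Int)) := by
        simp only [sweepStep]
        rw [hbox, hfd, hmd]
        rw [if_pos (by exact_mod_cast hqpos)]
        rw [hmod]
      rw [hstep, ih _ _ _ (fun r hr => hnn r (by simp [hr])) hdrop2 hLV]
      congr 1
      have hsplit : gsumFrom S M (L / M) (S.length / M)
          = gsumFrom S M (L / M) (L / M + q) + gsumFrom S M (L / M + q) (S.length / M) := by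
        refine gsumFrom_split S M _ _ _ (by omega) ?_
        rw [← hdiv]
        exact Nat.div_le_div_right hLV
      have hentry : ∀ t < q, S.getD ((L / M + t + 1) * M - 1) 0 = p.1 := by
        intro t ht
        have hdm : M * (L / M) + L % M = L := Nat.div_add_mod L M
        have hr : L % M < M := Nat.mod_lt _ hM
        have h3 : (t + 1) * M ≤ q * M := Nat.mul_le_mul_right M (by omega)
        have h5 : (L / M + t + 1) * M = M * (L / M) + (t + 1) * M := by ring
        have h6 : 1 * M ≤ (t + 1) * M := Nat.mul_le_mul_right M (by omega)
        have hjlo : L ≤ (L / M + t + 1) * M - 1 := by omega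
        have hjhi : (L / M + t + 1) * M - 1 < L + V := by omega
        set j : Nat := (L / M + t + 1) * M - 1 with hj
        rw [List.getD_eq_getElem?_getD]
        have hjsplit : j = L + (j - L) := by omega
        rw [hjsplit, ← List.getElem?_drop, hdropexp]
        rw [List.getElem?_append_left (by simp; omega)]
        rw [List.getElem?_replicate]
        rw [if_pos (by omega)]
        rfl
      have hconst : gsumFrom S M (L / M) (L / M + q) = p.1 * (M : Int) * (q : Int) := by
        unfold gsumFrom
        have : ∀ t ∈ List.range (L / M + q - L / M),
            S.getD ((L / M + t + 1) * M - 1) 0 * (M : Int) = p.1 * (M : Int) := by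
          intro t ht
          rw [hentry t (by simpa using ht)]
        rw [List.map_congr_left this]
        simp [List.sum_replicate, List.map_const']
        ring
      rw [hsplit, hconst, hdiv]
      ring
    · have hq0 : q = 0 := by omega
      have hlt : L % M + V < M := by
        have hdm2 := Nat.div_add_mod (L % M + V) M
        have hr2 := Nat.mod_lt (L % M + V) hM
        rw [← hq, hq0] at hdm2
        simp at hdm2
        omega
      have hstep : sweepStep (M : Int) (((L % M : Nat) : Int), ans) p
          = ((((L + V) % M : Nat) : Int), ans) := by
        simp only [sweepStep]
        rw [hbox, hfd]
        rw [if_neg (by rw [hq0]; simp)]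
        rw [hmod, Nat.mod_eq_of_lt hlt]
      rw [hstep, ih _ _ _ (fun r hr => hnn r (by simp [hr])) hdrop2 hLV]
      rw [hdiv, hq0, Nat.add_zero]

-- m < 0: 'box // m > 0' can never fire on a nonnegative box
lemma floordiv_nonpos (a m : Int) (ha : 0 ≤ a) (hm : m < 0) : PySem.Int.floordiv a m ≤ 0 := by
  have h1 := PySem.Int.floordiv_mul_add_mod a m
  have h2 := PySem.Int.mod_neg_bounds (a := a) hm
  nlinarith [h1, h2.1, h2.2]

lemma sweep_neg (m : Int) (hm : m < 0) :
    ∀ (ps : List (Int × Int)), (∀ p ∈ ps, 0 ≤ p.2) → ∀ (box ans : Int), 0 ≤ box →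
      (ps.foldl (sweepStep m) (box, ans)).2 = ans := by
  intro ps
  induction ps with
  | nil => intro _ box ans _; rfl
  | cons p tl ih =>
    intro h box ans hbox
    have hp : 0 ≤ p.2 := h p (by simp)
    have hb : 0 ≤ box + p.2 := by omega
    have hstep : sweepStep m (box, ans) p = (box + p.2, ans) := by
      simp only [sweepStep]
      rw [if_neg]
      have := floordiv_nonpos (box + p.2) m hb hm
      omega
    rw [List.foldl_cons, hstep]
    exact ih (fun r hr => h r (by simp [hr])) _ _ hb

-- 0 < m with fewer than m scores: the box never fills, answer stays 0
lemma sweep_small (m : Int) (hm : 0 < m) :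
    ∀ (ps : List (Int × Int)), (∀ p ∈ ps, 0 ≤ p.2) → ∀ (box ans : Int), 0 ≤ box →
      box + (ps.map (·.2)).sum < m → (ps.foldl (sweepStep m) (box, ans)).2 = ans := by
  intro ps
  induction ps with
  | nil => intro _ box ans _ _; rfl
  | cons p tl ih =>
    intro h box ans hbox hsum
    have hp : 0 ≤ p.2 := h p (by simp)
    have htl : 0 ≤ (tl.map (·.2)).sum := by
      apply List.sum_nonneg
      intro y hy
      obtain ⟨r, hr, rfl⟩ := List.mem_map.mp hy
      exact h r (by simp [hr])
    have hsum' : box + p.2 + (tl.map (·.2)).sum < m := by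
      simp only [List.map_cons, List.sum_cons] at hsum
      omega
    have hstep : sweepStep m (box, ans) p = (box + p.2, ans) := by
      simp only [sweepStep]
      rw [if_neg]
      rw [PySem.Int.floordiv_eq_ediv_of_pos hm]
      have : (box + p.2) / m = 0 := Int.ediv_eq_zero_of_lt (by omega) (by omega)
      omega
    rw [List.foldl_cons, hstep]
    exact ih (fun r hr => h r (by simp [hr])) _ _ (by omega) hsum'

-- the counting pass really counts (bucket j tallies j, and the wrapped j - 10)
lemma cnt_eq' (score : List Int) (h : ∀ x ∈ score, -10 ≤ x ∧ x ≤ 9) :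
    score.foldl cntStep [0,0,0,0,0,0,0,0,0,0]
      = [(cnt' score 0 : Int), (cnt' score 1 : Int), (cnt' score 2 : Int),
         (cnt' score 3 : Int), (cnt' score 4 : Int), (cnt' score 5 : Int),
         (cnt' score 6 : Int), (cnt' score 7 : Int), (cnt' score 8 : Int),
         (cnt' score 9 : Int)] := by
  induction score using List.reverseRecOn with
  | nil => simp [cnt']
  | append_singleton xs x ih =>
    have hx := h x (by simp)
    have hxs : ∀ y ∈ xs, -10 ≤ y ∧ y ≤ 9 := fun y hy => h y (by simp [hy])
    rw [List.foldl_append, ih hxs]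
    obtain ⟨h0, h9⟩ := hx
    interval_cases x <;>
      simp [cntStep, cnt', PySem.List.pySetD, PySem.List.pySet?, PySem.List.pyGetD,
        PySem.List.pyGet?, PySem.List.pyIdx?, List.countP_append]

-- without negative scores no wraparound happens: bucket j holds count(j)
lemma cnt'_eq_count (score : List Int) (hpos : ∀ x ∈ score, 0 ≤ x) (j : Int) (hj : 0 ≤ j)
    (hj9 : j ≤ 9) :
    cnt' score j = score.count j := by
  unfold cnt'
  rw [List.count_eq_countP]
  apply List.countP_congr
  intro x hx
  have := hpos x hx
  simp only [decide_eq_true_eq, beq_iff_eq]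
  constructor
  · rintro (rfl | rfl)
    · rfl
    · exfalso; omega
  · intro hxe; exact Or.inl hxe

-- every admitted score lands in exactly one bucket
lemma cnt_sum (score : List Int) (h : ∀ x ∈ score, -10 ≤ x ∧ x ≤ 9) :
    cnt' score 0 + cnt' score 1 + cnt' score 2 + cnt' score 3 + cnt' score 4 + cnt' score 5
      + cnt' score 6 + cnt' score 7 + cnt' score 8 + cnt' score 9 = score.length := by
  induction score with
  | nil => simp [cnt']
  | cons x xs ih =>
    have hx := h x (by simp)
    have hxs : ∀ y ∈ xs, -10 ≤ y ∧ y ≤ 9 := fun y hy => h y (by simp [hy])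
    obtain ⟨h0, h9⟩ := hx
    have := ih hxs
    simp only [cnt', List.countP_cons] at *
    interval_cases x <;> simp_all <;> omega

lemma enum10 (a0 a1 a2 a3 a4 a5 a6 a7 a8 a9 : Int) :
    (PySem.List.enumerate [a0,a1,a2,a3,a4,a5,a6,a7,a8,a9] 0).reverse
      = [(9,a9),(8,a8),(7,a7),(6,a6),(5,a5),(4,a4),(3,a3),(2,a2),(1,a1),(0,a0)] := by
  norm_num [PySem.List.enumerate_cons]

lemma mem_expand {x : Int} {ps : List (Int × Int)} (h : x ∈ expand ps) : ∃ p ∈ ps, x = p.1 := by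
  simp only [expand, List.mem_flatMap] at h
  obtain ⟨p, hp, hx⟩ := h
  exact ⟨p, hp, List.eq_of_mem_replicate hx⟩

lemma pairwise_expand : ∀ ps : List (Int × Int), ps.Pairwise (fun p q => q.1 ≤ p.1) →
    (expand ps).Pairwise (fun a b : Int => -a ≤ -b) := by
  intro ps
  induction ps with
  | nil => intro _; simp [expand]
  | cons p tl ih =>
    intro hpw
    rw [List.pairwise_cons] at hpw
    show (List.replicate p.2.toNat p.1 ++ expand tl).Pairwise _
    refine List.pairwise_append.mpr ⟨List.pairwise_replicate.mpr (by simp), ih hpw.2, ?_⟩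
    intro a ha b hb
    obtain rfl := List.eq_of_mem_replicate ha
    obtain ⟨r, hr, rfl⟩ := mem_expand hb
    have := hpw.1 r hr
    omega

-- the descending bucket expansion IS sorted(score, reverse=True)
lemma expand_eq_sorted (score : List Int) (h : ∀ x ∈ score, 0 ≤ x ∧ x ≤ 9) :
    PySem.List.sorted score (fun x => x) true
      = expand [(9, (score.count 9 : Int)), (8, (score.count 8 : Int)),
                (7, (score.count 7 : Int)), (6, (score.count 6 : Int)),
                (5, (score.count 5 : Int)), (4, (score.count 4 : Int)),
                (3, (score.count 3 : Int)), (2, (score.count 2 : Int)),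
                (1, (score.count 1 : Int)), (0, (score.count 0 : Int))] := by
  have hperm : (expand [(9, (score.count 9 : Int)), (8, (score.count 8 : Int)),
                (7, (score.count 7 : Int)), (6, (score.count 6 : Int)),
                (5, (score.count 5 : Int)), (4, (score.count 4 : Int)),
                (3, (score.count 3 : Int)), (2, (score.count 2 : Int)),
                (1, (score.count 1 : Int)), (0, (score.count 0 : Int))]).Perm score := by
    rw [List.perm_iff_count]
    intro a
    by_cases ha : 0 ≤ a ∧ a ≤ 9
    · obtain ⟨ha0, ha9⟩ := ha
      interval_cases a <;> simp [expand, List.count_append, List.count_replicate]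
    · have hnot : a ∉ score := fun hmem => ha (h a hmem)
      rw [List.count_eq_zero_of_not_mem hnot, List.count_eq_zero_of_not_mem]
      intro hmem
      obtain ⟨p, hp, rfl⟩ := mem_expand hmem
      fin_cases hp <;> simp_all
  have hpw : ([(9, (score.count 9 : Int)), (8, (score.count 8 : Int)),
      (7, (score.count 7 : Int)), (6, (score.count 6 : Int)),
      (5, (score.count 5 : Int)), (4, (score.count 4 : Int)),
      (3, (score.count 3 : Int)), (2, (score.count 2 : Int)),
      (1, (score.count 1 : Int)), (0, (score.count 0 : Int))]).Pairwise
      (fun p q : Int × Int => q.1 ≤ p.1) := by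
    norm_num [List.pairwise_cons]
  refine PySem.List.eq_of_perm_of_pairwise_le_of_injective (fun x : Int => -x) neg_injective
    ((PySem.List.sorted_perm score _ _).trans hperm.symm) ?_ (pairwise_expand _ hpw)
  exact (PySem.List.sorted_pairwise_rev score (fun x => x)).imp (fun h => by simpa using h)

-- B's loop, summed
lemma gsum_eq_fold (E : List Int) (M : Nat) (hM : 0 < M) (B : Nat) :
    gsumFrom E M 0 B
      = (PySem.List.pyRange 0 (B : Int) 1).foldl
          (fun answer b => answer + PySem.List.pyGetD E (b * (M : Int) + (M : Int) - 1) 0 * (M : Int)) 0 := by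
  rw [PySem.List.pyRange_zero_natCast]
  rw [List.foldl_map]
  rw [PySem.List.foldl_add (g := fun b : Nat =>
    PySem.List.pyGetD E ((b : Int) * (M : Int) + (M : Int) - 1) 0 * (M : Int))]
  rw [zero_add]
  unfold gsumFrom
  rw [Nat.sub_zero]
  refine congrArg List.sum (List.map_congr_left ?_).symm
  intro b hb
  have h1 : (b : Int) * (M : Int) + (M : Int) - 1 = (((b + 1) * M - 1 : Nat) : Int) := by
    have : 1 ≤ (b + 1) * M := by nlinarith
    push_cast [this]
    ring
  rw [h1, PySem.List.pyGetD_natCast]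
  have h2 : (0 + b + 1) = b + 1 := by omega
  rw [show E.getD ((b+1)*M-1) 0 = E.getD ((0+b+1)*M-1) 0 from by rw [h2]]

-- ===== VERDICT (by name: the statement is the Claim_ definition above) =====
theorem solution_spec : Claim_unchanged_solution := by
  intro k m score _ hpre hnD
  obtain ⟨hm, hsc⟩ := hpre
  show solution k m score = solution_alt k m score
  simp only [solution, solution_alt]
  rw [cnt_eq' score hsc, enum10]
  have hnn : ∀ p ∈ [((9:Int), (cnt' score 9 : Int)), (8, (cnt' score 8 : Int)),
      (7, (cnt' score 7 : Int)), (6, (cnt' score 6 : Int)),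
      (5, (cnt' score 5 : Int)), (4, (cnt' score 4 : Int)),
      (3, (cnt' score 3 : Int)), (2, (cnt' score 2 : Int)),
      (1, (cnt' score 1 : Int)), (0, (cnt' score 0 : Int))], 0 ≤ p.2 := by
    intro p hp
    fin_cases hp <;> positivity
  rcases lt_or_gt_of_ne hm with hml | hmg
  · -- m < 0: A's guard never fires, B's range(len(score)//m) is empty
    rw [sweep_neg m hml _ hnn 0 0 le_rfl]
    have hb : PySem.Int.floordiv ((score.length : Nat) : Int) m ≤ 0 :=
      floordiv_nonpos _ _ (by positivity) hml
    rw [PySem.List.pyRange_one_eq_nil hb]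
    rfl
  · -- m > 0: outside D_ either no score is negative, or fewer than m scores exist
    have hD' : (∀ x ∈ score, 0 ≤ x) ∨ (score.length : Int) < m := by
      unfold D_solution at hnD
      push Not at hnD
      by_cases hneg : ∀ x ∈ score, 0 ≤ x
      · exact Or.inl hneg
      · push Not at hneg
        obtain ⟨x, hx, hxneg⟩ := hneg
        have := hnD ⟨x, hx, by omega⟩ (by omega)
        exact Or.inr (by omega)
    rcases hD' with hpos | hbig
    · -- the generic case: counting sort vs explicit sort
      have hsc' : ∀ x ∈ score, 0 ≤ x ∧ x ≤ 9 := fun x hx => ⟨hpos x hx, (hsc x hx).2⟩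
      rw [cnt'_eq_count score hpos 9 (by norm_num) (by norm_num),
          cnt'_eq_count score hpos 8 (by norm_num) (by norm_num),
          cnt'_eq_count score hpos 7 (by norm_num) (by norm_num),
          cnt'_eq_count score hpos 6 (by norm_num) (by norm_num),
          cnt'_eq_count score hpos 5 (by norm_num) (by norm_num),
          cnt'_eq_count score hpos 4 (by norm_num) (by norm_num),
          cnt'_eq_count score hpos 3 (by norm_num) (by norm_num),
          cnt'_eq_count score hpos 2 (by norm_num) (by norm_num),
          cnt'_eq_count score hpos 1 (by norm_num) (by norm_num),
          cnt'_eq_count score hpos 0 (by norm_num) (by norm_num)]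
      have hnn' : ∀ p ∈ [((9:Int), (score.count 9 : Int)), (8, (score.count 8 : Int)),
          (7, (score.count 7 : Int)), (6, (score.count 6 : Int)),
          (5, (score.count 5 : Int)), (4, (score.count 4 : Int)),
          (3, (score.count 3 : Int)), (2, (score.count 2 : Int)),
          (1, (score.count 1 : Int)), (0, (score.count 0 : Int))], 0 ≤ p.2 := by
        intro p hp
        fin_cases hp <;> positivity
      have hmM : m = ((m.toNat : Nat) : Int) := (Int.toNat_of_nonneg hmg.le).symm
      set M : Nat := m.toNat with hMdef
      have hM : 0 < M := by omega
      have hE := expand_eq_sorted score hsc'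
      rw [hmM, hE]
      have hA := sweep_spec M hM _ 0 0 _ hnn' (by rw [List.drop_zero]) (Nat.zero_le _)
      simp only [Nat.zero_mod, Nat.cast_zero, Nat.zero_div, zero_add] at hA
      rw [hA]
      have hlenE : (expand [((9:Int), (score.count 9 : Int)), (8, (score.count 8 : Int)),
          (7, (score.count 7 : Int)), (6, (score.count 6 : Int)),
          (5, (score.count 5 : Int)), (4, (score.count 4 : Int)),
          (3, (score.count 3 : Int)), (2, (score.count 2 : Int)),
          (1, (score.count 1 : Int)), (0, (score.count 0 : Int))]).length = score.length := by
        rw [← hE, PySem.List.length_sorted]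
      rw [hlenE]
      rw [PySem.Int.floordiv_natCast]
      exact gsum_eq_fold _ M hM _
    · -- fewer than m scores: no box is ever filled, both sides return 0
      have hsum : (0 : Int) + ([((9:Int), (cnt' score 9 : Int)), (8, (cnt' score 8 : Int)),
          (7, (cnt' score 7 : Int)), (6, (cnt' score 6 : Int)),
          (5, (cnt' score 5 : Int)), (4, (cnt' score 4 : Int)),
          (3, (cnt' score 3 : Int)), (2, (cnt' score 2 : Int)),
          (1, (cnt' score 1 : Int)), (0, (cnt' score 0 : Int))].map (·.2)).sum < m := by
        have h10 := cnt_sum score hsc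
        simp only [List.map_cons, List.map_nil, List.sum_cons, List.sum_nil]
        omega
      rw [sweep_small m hmg _ hnn 0 0 le_rfl hsum]
      have hb : PySem.Int.floordiv ((score.length : Nat) : Int) m = 0 := by
        rw [PySem.Int.floordiv_eq_ediv_of_pos hmg]
        exact Int.ediv_eq_zero_of_lt (by positivity) (by exact_mod_cast hbig)
      rw [hb, PySem.List.pyRange_one_eq_nil le_rfl]
      rfl

theorem solution_changed : Claim_changed_solution := by
  unfold Claim_changed_solution
  decide
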